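-- pv_equiv track=rewrite | github.com/tsutomu-nagano/json2excel | json2excel/utils.py | around_ranges
-- ===== SOURCE A (Python) =====
-- def around_ranges(ranges):
--     rows = [r["row"] for r in ranges]
--     cols = [r["col"] for r in ranges]
--
--     row_min = min(rows)
--     col_min = min(cols)
--     row_max = max(rows)
--     col_max = max(cols)
--
--     ret = {}
--     ret["left"] = [r for r in ranges if r["col"] == col_min]
--     ret["right"] = [r for r in ranges if r["col"] == col_max]
--     ret["top"] = [r for r in ranges if r["row"] == row_min]
--     ret["bottom"] = [r for r in ranges if r["row"] == row_max]
--
--     return(ret)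
-- ===== SOURCE B (Python) =====
-- def around_ranges(ranges):
--     by_col = {}
--     by_row = {}
--     for r in ranges:
--         by_col.setdefault(r["col"], []).append(r)
--         by_row.setdefault(r["row"], []).append(r)
--     return {
--         "left": by_col[min(by_col)],
--         "right": by_col[max(by_col)],
--         "top": by_row[min(by_row)],
--         "bottom": by_row[max(by_row)],
--     }
-- ===== Notes on version B (the rewrite author's own statement) =====
-- stated objective: alternative
-- what changed: B makes one pass over ranges grouping them into two dicts keyed by col and by row (bucket lists in encounter order), then selects the buckets at the min/max keys, instead of A's six separate scans (two projections, four min/max, four filters).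
import Mathlib
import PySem

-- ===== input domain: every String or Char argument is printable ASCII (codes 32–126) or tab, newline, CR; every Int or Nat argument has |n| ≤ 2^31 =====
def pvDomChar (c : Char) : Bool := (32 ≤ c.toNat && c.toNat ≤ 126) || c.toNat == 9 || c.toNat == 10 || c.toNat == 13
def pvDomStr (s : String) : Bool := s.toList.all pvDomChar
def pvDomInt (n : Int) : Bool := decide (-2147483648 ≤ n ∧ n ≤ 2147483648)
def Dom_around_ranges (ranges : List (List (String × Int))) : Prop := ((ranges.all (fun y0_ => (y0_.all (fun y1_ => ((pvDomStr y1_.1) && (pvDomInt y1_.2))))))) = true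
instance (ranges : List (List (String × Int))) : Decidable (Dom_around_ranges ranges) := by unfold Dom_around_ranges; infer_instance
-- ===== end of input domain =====

-- B groups the ranges into two dicts (by col, by row) in one pass and selects the
-- buckets at the min/max keys, instead of A's six separate scans. Same values proved equal.

-- r["k"] : shared dict-entry getter (exact under Pre_, which guarantees the key is present)
def pvGet (r : List (String × Int)) (k : String) : Int := PySem.Dict.getD (PySem.Dict.mk r) k 0

-- ===== PORT A =====
def around_ranges (ranges : List (List (String × Int))) : List (String × List (List (String × Int))) :=
  let rows := ranges.map (fun r => pvGet r "row")
  let cols := ranges.map (fun r => pvGet r "col")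
  let row_min := (PySem.List.min? rows (fun x => x)).getD 0
  let col_min := (PySem.List.min? cols (fun x => x)).getD 0
  let row_max := (PySem.List.max? rows (fun x => x)).getD 0
  let col_max := (PySem.List.max? cols (fun x => x)).getD 0
  [("left",   ranges.filter (fun r => pvGet r "col" == col_min)),
   ("right",  ranges.filter (fun r => pvGet r "col" == col_max)),
   ("top",    ranges.filter (fun r => pvGet r "row" == row_min)),
   ("bottom", ranges.filter (fun r => pvGet r "row" == row_max))]

-- ===== PORT B =====
def around_ranges_alt (ranges : List (List (String × Int))) : List (String × List (List (String × Int))) :=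
  let p := ranges.foldl
    (fun (p : PySem.Dict Int (List (List (String × Int))) × PySem.Dict Int (List (List (String × Int)))) r =>
      (p.1.modify (pvGet r "col") [] (fun l => l ++ [r]),
       p.2.modify (pvGet r "row") [] (fun l => l ++ [r])))
    (PySem.Dict.empty, PySem.Dict.empty)
  let by_col := p.1
  let by_row := p.2
  [("left",   by_col.getD ((PySem.List.min? by_col.keys (fun x => x)).getD 0) []),
   ("right",  by_col.getD ((PySem.List.max? by_col.keys (fun x => x)).getD 0) []),
   ("top",    by_row.getD ((PySem.List.min? by_row.keys (fun x => x)).getD 0) []),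
   ("bottom", by_row.getD ((PySem.List.max? by_row.keys (fun x => x)).getD 0) [])]

-- ===== PRECONDITION & SPEC =====
-- Pre_ excludes exactly the inputs on which Python A raises: the empty list
-- (min() of an empty sequence → ValueError) and ranges whose dicts lack a
-- "row" or "col" key (KeyError).
def Pre_around_ranges (ranges : List (List (String × Int))) : Prop :=
  ranges ≠ [] ∧
  ranges.all (fun r => (PySem.Dict.mk r).contains "row" && (PySem.Dict.mk r).contains "col") = true
instance (ranges : List (List (String × Int))) : Decidable (Pre_around_ranges ranges) := by
  unfold Pre_around_ranges; infer_instance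

def pvWitness_around_ranges : (List (List (String × Int))) := [[("row", 1), ("col", 2)]]

def Spec_around_ranges (ranges : List (List (String × Int))) (out : List (String × List (List (String × Int)))) : Prop := out = around_ranges_alt ranges
instance (ranges : List (List (String × Int))) (out : List (String × List (List (String × Int)))) : Decidable (Spec_around_ranges ranges out) := by unfold Spec_around_ranges; infer_instance

-- ===== CLAIM (what is proved, stated in full; the proofs are below) =====
def Claim_equal_around_ranges : Prop := ∀ (ranges : List (List (String × Int))), Dom_around_ranges ranges → Pre_around_ranges ranges → Spec_around_ranges ranges (around_ranges ranges)

-- ===== LEMMAS AND PROOFS =====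

-- B's single pass updates the two dicts independently: it is the pair of the two grouping folds
theorem pv_foldl_pair :
    ∀ (l : List (List (String × Int)))
      (b c : PySem.Dict Int (List (List (String × Int)))),
      l.foldl (fun p r => (p.1.modify (pvGet r "col") [] (fun l => l ++ [r]),
                           p.2.modify (pvGet r "row") [] (fun l => l ++ [r]))) (b, c)
        = (l.foldl (fun d r => d.modify (pvGet r "col") [] (fun l => l ++ [r])) b,
           l.foldl (fun d r => d.modify (pvGet r "row") [] (fun l => l ++ [r])) c) := by
  intro l
  induction l with
  | nil => intro b c; rfl
  | cons x t ih => intro b c; simpa using ih _ _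

-- the grouping dict's bucket at c is the filter by key = c
theorem pv_getD_group (key : List (String × Int) → Int) (ranges : List (List (String × Int))) (c : Int) :
    (ranges.foldl (fun d r => d.modify (key r) [] (fun l => l ++ [r])) PySem.Dict.empty).getD c []
      = ranges.filter (fun r => key r == c) := by
  have h := PySem.Dict.getD_foldl_modify_append
    (ranges.map (fun r => (key r, r))) (PySem.Dict.empty) c
  rw [List.foldl_map] at h
  simpa [List.filter_map, Function.comp_def] using h
  
-- the grouping dict's keys are the distinct key values in first-occurrence order
theorem pv_keys_group (key : List (String × Int) → Int) (ranges : List (List (String × Int))) :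
    (ranges.foldl (fun d r => d.modify (key r) [] (fun l => l ++ [r])) PySem.Dict.empty).keys
      = PySem.Set.ofList (ranges.map key) := by
  rw [PySem.Dict.keys_foldl_modify_key ranges key [] (fun _ r l => l ++ [r]) PySem.Dict.empty]
  simp [PySem.Dict.keys_empty, PySem.Set.update_nil_left]

-- min over any list with the same members gives the same value
theorem pv_minD_congr (xs ys : List Int) (h : ∀ a : Int, a ∈ xs ↔ a ∈ ys) :
    (PySem.List.min? xs (fun x => x)).getD 0 = (PySem.List.min? ys (fun x => x)).getD 0 := by
  rcases hx : PySem.List.min? xs (fun x => x) with _ | m1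
  · have hxs : xs = [] := (PySem.List.min?_eq_none_iff xs _).mp hx
    have hys : ys = [] := by
      cases ys with
      | nil => rfl
      | cons y t => exact absurd ((h y).mpr (by simp)) (by simp [hxs])
    simp [hys, PySem.List.min?]
  · rcases hy : PySem.List.min? ys (fun x => x) with _ | m2
    · have hys : ys = [] := (PySem.List.min?_eq_none_iff ys _).mp hy
      have := PySem.List.min?_mem hx
      exact absurd ((h m1).mp this) (by simp [hys])
    · have h1 : m1 ∈ ys := (h m1).mp (PySem.List.min?_mem hx)
      have h2 : m2 ∈ xs := (h m2).mpr (PySem.List.min?_mem hy)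
      have l1 := PySem.List.min?_isMin hx m2 h2
      have l2 := PySem.List.min?_isMin hy m1 h1
      simpa using le_antisymm l1 l2

theorem pv_maxD_congr (xs ys : List Int) (h : ∀ a : Int, a ∈ xs ↔ a ∈ ys) :
    (PySem.List.max? xs (fun x => x)).getD 0 = (PySem.List.max? ys (fun x => x)).getD 0 := by
  rcases hx : PySem.List.max? xs (fun x => x) with _ | m1
  · have hxs : xs = [] := (PySem.List.max?_eq_none_iff xs _).mp hx
    have hys : ys = [] := by
      cases ys with
      | nil => rfl
      | cons y t => exact absurd ((h y).mpr (by simp)) (by simp [hxs])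
    simp [hys, PySem.List.max?]
  · rcases hy : PySem.List.max? ys (fun x => x) with _ | m2
    · have hys : ys = [] := (PySem.List.max?_eq_none_iff ys _).mp hy
      have := PySem.List.max?_mem hx
      exact absurd ((h m1).mp this) (by simp [hys])
    · have h1 : m1 ∈ ys := (h m1).mp (PySem.List.max?_mem hx)
      have h2 : m2 ∈ xs := (h m2).mpr (PySem.List.max?_mem hy)
      have l1 := PySem.List.max?_isMax hx m2 h2
      have l2 := PySem.List.max?_isMax hy m1 h1
      simpa using le_antisymm l2 l1

-- members of keys = members of the projected list
theorem pv_mem_keys_group (key : List (String × Int) → Int) (ranges : List (List (String × Int))) (a : Int) :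
    a ∈ (ranges.foldl (fun d r => d.modify (key r) [] (fun l => l ++ [r])) PySem.Dict.empty).keys
      ↔ a ∈ ranges.map key := by
  rw [pv_keys_group]
  exact PySem.Set.mem_ofList _ a

-- ===== VERDICT (by name: the statement is the Claim_ definition above) =====
theorem around_ranges_spec : Claim_equal_around_ranges := by
  intro ranges _ _
  unfold Spec_around_ranges around_ranges around_ranges_alt
  dsimp only
  rw [pv_foldl_pair]
  dsimp only
  rw [pv_getD_group (fun r => pvGet r "col"),
      pv_getD_group (fun r => pvGet r "col"),
      pv_getD_group (fun r => pvGet r "row"),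
      pv_getD_group (fun r => pvGet r "row"),
      pv_minD_congr _ _ (pv_mem_keys_group (fun r => pvGet r "col") ranges),
      pv_maxD_congr _ _ (pv_mem_keys_group (fun r => pvGet r "col") ranges),
      pv_minD_congr _ _ (pv_mem_keys_group (fun r => pvGet r "row") ranges),
      pv_maxD_congr _ _ (pv_mem_keys_group (fun r => pvGet r "row") ranges)]
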